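-- pv_equiv track=rewrite | github.com/bdalevin/LiberTEM | src/libertem/executor/dask.py | _task_idx_to_workers
-- ===== SOURCE A (Python) =====
-- def _task_idx_to_workers(workers, idx):
--     hosts = list(sorted(set(w['host'] for w in workers)))
--     host_idx = idx % len(hosts)
--     host = hosts[host_idx]
--     return [
--         w['name']
--         for w in workers
--         if w['host'] == host
--     ]
-- ===== SOURCE B (Python) =====
-- def _task_idx_to_workers(workers, idx):
--     grouped = {}
--     for w in workers:
--         grouped.setdefault(w['host'], []).append(w['name'])
--     hosts = sorted(grouped)
--     return grouped[hosts[idx % len(hosts)]]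
-- ===== Notes on version B (the rewrite author's own statement) =====
-- stated objective: idiomatic
-- what changed: B makes one grouping pass building host -> list-of-names with dict.setdefault, then sorts the dict keys and returns the selected host's list directly, instead of A's set-comprehension + sort + a second filtering rescan of all workers.
-- outside the precondition, e.g. on _task_idx_to_workers([{'host': 'a', 'name': 'x'}, {'host': 'b'}], 0): A returns ['x'], B raises KeyError
import Mathlib
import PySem

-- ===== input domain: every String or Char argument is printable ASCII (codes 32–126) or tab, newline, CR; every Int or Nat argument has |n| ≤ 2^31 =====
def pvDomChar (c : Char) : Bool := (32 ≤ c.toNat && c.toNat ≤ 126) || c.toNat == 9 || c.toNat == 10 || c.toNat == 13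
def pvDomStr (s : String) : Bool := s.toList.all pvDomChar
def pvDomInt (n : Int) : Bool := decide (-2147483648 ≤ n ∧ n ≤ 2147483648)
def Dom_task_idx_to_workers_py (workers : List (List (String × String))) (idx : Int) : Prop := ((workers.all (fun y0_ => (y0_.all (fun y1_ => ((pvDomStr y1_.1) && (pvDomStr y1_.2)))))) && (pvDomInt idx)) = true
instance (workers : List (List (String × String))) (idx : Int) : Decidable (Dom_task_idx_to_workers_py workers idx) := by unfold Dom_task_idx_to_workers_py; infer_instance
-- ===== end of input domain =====

-- One honest line: B groups worker names by host in one dict pass and looks the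
-- selected host up, instead of A's set+sort then a second filtering rescan (idiomatic).

-- w['host'] / w['name']; the "" default is only reached where Python raises KeyError,
-- which Pre_task_idx_to_workers_py excludes.
def pvHost (w : List (String × String)) : String := (PySem.Dict.mk w).getD "host" ""
def pvName (w : List (String × String)) : String := (PySem.Dict.mk w).getD "name" ""

-- ===== PORT A =====
def task_idx_to_workers_py (workers : List (List (String × String))) (idx : Int) : List String :=
  let hosts := PySem.List.sorted (PySem.Set.ofList (workers.map pvHost)) (fun x => x) false
  -- hosts[idx % len(hosts)]; len(hosts) = 0 (ZeroDivisionError) is excluded by Pre_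
  let host := PySem.List.pyGetD hosts (PySem.Int.mod idx (hosts.length : Int)) ""
  (workers.filter (fun w => pvHost w == host)).map pvName

-- ===== PORT B =====
def task_idx_to_workers_py_alt (workers : List (List (String × String))) (idx : Int) : List String :=
  let grouped := workers.foldl
    (fun d w => PySem.Dict.modify d (pvHost w) [] (fun l => l ++ [pvName w]))
    (PySem.Dict.empty : PySem.Dict String (List String))
  let hosts := PySem.List.sorted (PySem.Dict.keys grouped) (fun x => x) false
  grouped.getD (PySem.List.pyGetD hosts (PySem.Int.mod idx (hosts.length : Int)) "") []

-- ===== PRECONDITION & SPEC =====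
-- Pre_ excludes inputs on which Python A raises (empty workers: ZeroDivisionError;
-- a worker without a 'host' key: KeyError) and, additionally, workers lacking a
-- 'name' key: there A raises KeyError unless the worker's host is the unselected
-- one (an idx-dependent accident), while B's natural grouping pass reads every
-- worker's 'name' and raises KeyError.
def Pre_task_idx_to_workers_py (workers : List (List (String × String))) (idx : Int) : Prop :=
  workers ≠ [] ∧ ∀ w ∈ workers,
    (PySem.Dict.mk w).contains "host" = true ∧ (PySem.Dict.mk w).contains "name" = true
instance (workers : List (List (String × String))) (idx : Int) : Decidable (Pre_task_idx_to_workers_py workers idx) := by unfold Pre_task_idx_to_workers_py; infer_instance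
def pvWitness_task_idx_to_workers_py : (List (List (String × String))) × Int :=
  ([[("host", "h1"), ("name", "w1")], [("host", "h2"), ("name", "w2")]], 3)

def Spec_task_idx_to_workers_py (workers : List (List (String × String))) (idx : Int) (out : List String) : Prop := out = task_idx_to_workers_py_alt workers idx
instance (workers : List (List (String × String))) (idx : Int) (out : List String) : Decidable (Spec_task_idx_to_workers_py workers idx out) := by unfold Spec_task_idx_to_workers_py; infer_instance

-- ===== CLAIM (what is proved, stated in full; the proofs are below) =====
def Claim_equal_task_idx_to_workers_py : Prop := ∀ (workers : List (List (String × String))) (idx : Int), Dom_task_idx_to_workers_py workers idx → Pre_task_idx_to_workers_py workers idx → Spec_task_idx_to_workers_py workers idx (task_idx_to_workers_py workers idx)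

-- ===== LEMMAS AND PROOFS =====

-- B's grouping dict has the distinct hosts (first occurrences, in order) as keys.
theorem pv_keys_grouped (workers : List (List (String × String))) :
    (workers.foldl
      (fun d w => PySem.Dict.modify d (pvHost w) [] (fun l => l ++ [pvName w]))
      (PySem.Dict.empty : PySem.Dict String (List String))).keys
    = PySem.Set.ofList (workers.map pvHost) := by
  rw [PySem.Dict.keys_foldl_modify_key]
  simp [PySem.Set.update, PySem.Set.ofList_eq_foldl]

-- B's grouping dict maps each host to the names of its workers, in encounter order.
theorem pv_getD_grouped (workers : List (List (String × String))) (h : String) :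
    (workers.foldl
      (fun d w => PySem.Dict.modify d (pvHost w) [] (fun l => l ++ [pvName w]))
      (PySem.Dict.empty : PySem.Dict String (List String))).getD h []
    = (workers.filter (fun w => pvHost w == h)).map pvName := by
  have := PySem.Dict.getD_foldl_modify_append
    (l := workers.map (fun w => (pvHost w, pvName w)))
    (d := (PySem.Dict.empty : PySem.Dict String (List String))) (c := h)
  rw [List.foldl_map] at this
  simpa [List.filter_map, List.map_map, Function.comp] using this

-- ===== VERDICT (by name: the statement is the Claim_ definition above) =====
theorem task_idx_to_workers_py_spec : Claim_equal_task_idx_to_workers_py := by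
  intro workers idx _ _
  simp only [Spec_task_idx_to_workers_py, task_idx_to_workers_py, task_idx_to_workers_py_alt,
    pv_keys_grouped, pv_getD_grouped]
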